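-- pv_equiv track=rewrite | github.com/johansievertlindeskog/EDAN20-Language-Technology | extractingNounGroupsLab4.py | extract_features_static
-- ===== SOURCE A (Python) =====
-- def extract_features_sent_static(sentence, w_size, feature_names):
--     """
--     Extract the features from one sentence
--     returns X and y, where X is a list of dictionaries and
--     y is a list of symbols
--     :param sentence: string containing the CoNLL structure of a sentence
--     :param w_size:
--     :return:
--     """
--
--     # We pad the sentence to extract the context window more easily
--     start = [{'form': 'BOS', 'pos': 'BOS', 'chunk': 'BOS'}]
--     end = [{'form': 'EOS', 'pos': 'EOS', 'chunk': 'EOS'}]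
--     start *= w_size
--     end *= w_size
--     padded_sentence = start + sentence
--     padded_sentence += end
--
--     # We extract the features and the classes
--     # X contains is a list of features, where each feature vector is a dictionary
--     # y is the list of classes
--     X = list()
--     y = list()
--     for i in range(len(padded_sentence) - 2 * w_size):
--         # x is a row of X
--         x = list()
--         # The words in lower case
--         for j in range(2 * w_size + 1):
--             x.append(padded_sentence[i + j]['form'].lower())
--         # The POS
--         for j in range(2 * w_size + 1):
--             x.append(padded_sentence[i + j]['pos'])
--         # The chunks (Up to the word)
--         """
--         for j in range(w_size):
--             feature_line.append(padded_sentence[i + j]['chunk'])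
--         """
--         # We represent the feature vector as a dictionary
--         X.append(dict(zip(feature_names, x)))
--         # The classes are stored in a list
--         y.append(padded_sentence[i + w_size]['chunk'])
--     return X, y
--
-- def extract_features_static(sentences, w_size, feature_names):
--     """
--     Builds X matrix and y vector
--     X is a list of dictionaries and y is a list
--     :param sentences:
--     :param w_size:
--     :return:
--     """
--     X_l = []
--     y_l = []
--     for sentence in sentences:
--         X, y = extract_features_sent_static(sentence, w_size, feature_names)
--         X_l.extend(X)
--         y_l.extend(y)
--     return X_l, y_l
-- ===== SOURCE B (Python) =====
-- def extract_features_static(sentences, w_size, feature_names):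
--     """Window features by boundary-checked direct indexing: no padded copy of
--     the sentence is built; out-of-range positions yield the sentinels directly."""
--     X_l = []
--     y_l = []
--     for sentence in sentences:
--         n = len(sentence)
--         offsets = range(-w_size, w_size + 1)
--         for p in range(n):
--             forms = ['bos' if p + o < 0 else 'eos' if p + o >= n
--                      else sentence[p + o]['form'].lower() for o in offsets]
--             poss = ['BOS' if p + o < 0 else 'EOS' if p + o >= n
--                     else sentence[p + o]['pos'] for o in offsets]
--             X_l.append(dict(zip(feature_names, forms + poss)))
--             y_l.append(sentence[p]['chunk'])
--     return X_l, y_l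
-- ===== Notes on version B (the rewrite author's own statement) =====
-- stated objective: alternative
-- what changed: B drops the BOS/EOS padded-sentence construction entirely and computes each window by boundary-checked direct indexing into the original sentence (offsets -w..w, emitting 'bos'/'eos'/'BOS'/'EOS' sentinels at out-of-range positions), building the form/pos blocks as comprehensions instead of append loops over a padded copy.
import Mathlib
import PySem

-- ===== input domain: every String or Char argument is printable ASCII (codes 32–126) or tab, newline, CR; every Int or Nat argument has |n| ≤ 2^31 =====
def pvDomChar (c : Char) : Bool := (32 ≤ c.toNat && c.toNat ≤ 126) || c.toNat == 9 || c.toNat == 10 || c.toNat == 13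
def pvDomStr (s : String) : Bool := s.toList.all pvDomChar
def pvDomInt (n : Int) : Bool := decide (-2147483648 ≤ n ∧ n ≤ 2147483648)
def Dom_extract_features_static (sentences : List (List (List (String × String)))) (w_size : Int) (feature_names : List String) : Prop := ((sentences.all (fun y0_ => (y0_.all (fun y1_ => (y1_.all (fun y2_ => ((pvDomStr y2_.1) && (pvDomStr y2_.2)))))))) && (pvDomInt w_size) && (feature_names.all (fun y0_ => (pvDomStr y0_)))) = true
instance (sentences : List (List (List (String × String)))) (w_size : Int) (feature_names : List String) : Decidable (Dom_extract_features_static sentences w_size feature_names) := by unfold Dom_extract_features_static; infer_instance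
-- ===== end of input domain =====

-- B replaces A's BOS/EOS-padded copy of each sentence by boundary-checked direct indexing
-- into the original sentence (objective: alternative decomposition, same asymptotic cost).

-- token['k'] on a Python dict token (assoc list, first match; "" only outside Pre_)
def pvTokGet (tok : List (String × String)) (k : String) : String :=
  (PySem.Dict.mk tok).getD k ""

-- ===== PORT A =====
def extract_features_sent_static (sentence : List (List (String × String))) (w_size : Int) (feature_names : List String) : (List (List (String × String))) × List String :=
  let start := PySem.List.pyRepeat [[("form", "BOS"), ("pos", "BOS"), ("chunk", "BOS")]] w_size
  let «end» := PySem.List.pyRepeat [[("form", "EOS"), ("pos", "EOS"), ("chunk", "EOS")]] w_size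
  let padded_sentence := start ++ sentence ++ «end»
  (PySem.List.pyRange 0 ((padded_sentence.length : Int) - 2 * w_size) 1).foldl
    (fun XY i =>
      let x := (PySem.List.pyRange 0 (2 * w_size + 1) 1).foldl
        (fun x j => x ++ [PySem.Str.lower (pvTokGet (PySem.List.pyGetD padded_sentence (i + j) []) "form")]) []
      let x := (PySem.List.pyRange 0 (2 * w_size + 1) 1).foldl
        (fun x j => x ++ [pvTokGet (PySem.List.pyGetD padded_sentence (i + j) []) "pos"]) x
      (XY.1 ++ [(PySem.Dict.ofList (feature_names.zip x)).items],
       XY.2 ++ [pvTokGet (PySem.List.pyGetD padded_sentence (i + w_size) []) "chunk"]))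
    ([], [])

def extract_features_static (sentences : List (List (List (String × String)))) (w_size : Int) (feature_names : List String) : (List (List (String × String))) × List String :=
  sentences.foldl
    (fun XYl sentence =>
      let r := extract_features_sent_static sentence w_size feature_names
      (XYl.1 ++ r.1, XYl.2 ++ r.2))
    ([], [])

-- ===== PORT B =====
def extract_features_static_alt (sentences : List (List (List (String × String)))) (w_size : Int) (feature_names : List String) : (List (List (String × String))) × List String :=
  sentences.foldl
    (fun XYl sentence =>
      let n : Int := sentence.length
      let offsets := PySem.List.pyRange (-w_size) (w_size + 1) 1
      (PySem.List.pyRange 0 n 1).foldl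
        (fun XYl p =>
          let forms := offsets.map (fun o =>
            if p + o < 0 then "bos" else if n ≤ p + o then "eos"
            else PySem.Str.lower (pvTokGet (PySem.List.pyGetD sentence (p + o) []) "form"))
          let poss := offsets.map (fun o =>
            if p + o < 0 then "BOS" else if n ≤ p + o then "EOS"
            else pvTokGet (PySem.List.pyGetD sentence (p + o) []) "pos")
          (XYl.1 ++ [(PySem.Dict.ofList (feature_names.zip (forms ++ poss))).items],
           XYl.2 ++ [pvTokGet (PySem.List.pyGetD sentence p []) "chunk"]))
        XYl)
    ([], [])

-- ===== PRECONDITION & SPEC =====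
-- Pre_ excludes exactly the inputs where Python A raises: a negative w_size with any sentence
-- present (IndexError), and tokens missing one of the 'form'/'pos'/'chunk' keys (KeyError).
def Pre_extract_features_static (sentences : List (List (List (String × String)))) (w_size : Int) (feature_names : List String) : Prop :=
  (0 ≤ w_size ∨ sentences = []) ∧
  sentences.all (fun sent => sent.all (fun tok =>
    (tok.map Prod.fst).contains "form" && (tok.map Prod.fst).contains "pos" &&
    (tok.map Prod.fst).contains "chunk")) = true
instance (sentences : List (List (List (String × String)))) (w_size : Int) (feature_names : List String) : Decidable (Pre_extract_features_static sentences w_size feature_names) := by unfold Pre_extract_features_static; infer_instance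

def pvWitness_extract_features_static : (List (List (List (String × String)))) × Int × List String :=
  ([[[("form", "The"), ("pos", "DT"), ("chunk", "B-NP")], [("form", "cat"), ("pos", "NN"), ("chunk", "I-NP")]]],
   1, ["w0", "w1", "w2", "p0", "p1", "p2"])

def Spec_extract_features_static (sentences : List (List (List (String × String)))) (w_size : Int) (feature_names : List String) (out : (List (List (String × String))) × List String) : Prop := out = extract_features_static_alt sentences w_size feature_names
instance (sentences : List (List (List (String × String)))) (w_size : Int) (feature_names : List String) (out : (List (List (String × String))) × List String) : Decidable (Spec_extract_features_static sentences w_size feature_names out) := by unfold Spec_extract_features_static; infer_instance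

-- ===== CLAIM (what is proved, stated in full; the proofs are below) =====
def Claim_equal_extract_features_static : Prop := ∀ (sentences : List (List (List (String × String)))) (w_size : Int) (feature_names : List String), Dom_extract_features_static sentences w_size feature_names → Pre_extract_features_static sentences w_size feature_names → Spec_extract_features_static sentences w_size feature_names (extract_features_static sentences w_size feature_names)

-- ===== LEMMAS AND PROOFS =====

-- a loop appending one X-row and one y-value per index is a pair of maps
theorem pvFoldPair {β γ δ : Type} (l : List β) (F : β → γ) (G : β → δ) (acc : List γ × List δ) :
    l.foldl (fun XY i => (XY.1 ++ [F i], XY.2 ++ [G i])) acc = (acc.1 ++ l.map F, acc.2 ++ l.map G) := by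
  rw [← Prod.mk.eta (p := acc),
    PySem.List.foldl_prod_mk (f := fun X i => X ++ [F i]) (g := fun Y i => Y ++ [G i]),
    PySem.List.foldl_append_singleton_eq_map, PySem.List.foldl_append_singleton_eq_map]

-- indexing into the padded sentence is boundary-checked indexing into the original
theorem pvPadGet (sentence : List (List (String × String))) (w q : Int) (b e : List (String × String))
    (hw : 0 ≤ w) (h1 : -w ≤ q) (h2 : q < (sentence.length : Int) + w) :
    PySem.List.pyGetD (List.replicate w.toNat b ++ sentence ++ List.replicate w.toNat e) (q + w) [] =
      (if q < 0 then b else if (sentence.length : Int) ≤ q then e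
       else PySem.List.pyGetD sentence q []) := by
  rw [PySem.List.pyGetD_eq_getElem _ [] (by omega) (by simp [List.length_append]; omega)]
  by_cases hq0 : q < 0
  · rw [List.getElem_append_left (by simp [List.length_append]; omega),
      List.getElem_append_left (by simp; omega)]
    simp [hq0]
  · by_cases hqn : (sentence.length : Int) ≤ q
    · rw [List.getElem_append_right (by simp [List.length_append]; omega)]
      simp [hq0, hqn]
    · rw [List.getElem_append_left (by simp [List.length_append]; omega),
        List.getElem_append_right (by simp; omega),
        PySem.List.pyGetD_eq_getElem _ [] (by omega) (by omega)]
      simp only [if_neg hq0, if_neg hqn]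
      congr 1
      simp
      omega

-- one sentence: B's window row / class at index p equals A's row / class over the padded sentence
theorem pvSent_eq (sentence : List (List (String × String))) (w : Int) (names : List String)
    (hw : 0 ≤ w) :
    extract_features_sent_static sentence w names
    = ((PySem.List.pyRange 0 ((sentence.length : Int)) 1).map (fun p =>
          (PySem.Dict.ofList (names.zip
            ((PySem.List.pyRange (-w) (w + 1) 1).map (fun o =>
              if p + o < 0 then "bos" else if (sentence.length : Int) ≤ p + o then "eos"
              else PySem.Str.lower (pvTokGet (PySem.List.pyGetD sentence (p + o) []) "form")) ++
             (PySem.List.pyRange (-w) (w + 1) 1).map (fun o =>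
              if p + o < 0 then "BOS" else if (sentence.length : Int) ≤ p + o then "EOS"
              else pvTokGet (PySem.List.pyGetD sentence (p + o) []) "pos")))).items),
       (PySem.List.pyRange 0 ((sentence.length : Int)) 1).map (fun p =>
          pvTokGet (PySem.List.pyGetD sentence p []) "chunk")) := by
  have hrepl : ∀ a : List (String × String), PySem.List.pyRepeat [a] w = List.replicate w.toNat a :=
    fun a => PySem.List.pyRepeat_singleton a w
  simp only [extract_features_sent_static, hrepl]
  have hlen : (((List.replicate w.toNat [("form", "BOS"), ("pos", "BOS"), ("chunk", "BOS")] ++ sentence ++ List.replicate w.toNat [("form", "EOS"), ("pos", "EOS"), ("chunk", "EOS")]).length : Int) - 2 * w)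
      = (sentence.length : Int) := by
    simp [List.length_append]
    omega
  rw [hlen]
  rw [pvFoldPair (PySem.List.pyRange 0 ((sentence.length : Int)) 1)
    (F := fun i => (PySem.Dict.ofList (names.zip
        ((PySem.List.pyRange 0 (2 * w + 1) 1).foldl
          (fun x j => x ++ [pvTokGet (PySem.List.pyGetD (List.replicate w.toNat [("form", "BOS"), ("pos", "BOS"), ("chunk", "BOS")] ++ sentence ++ List.replicate w.toNat [("form", "EOS"), ("pos", "EOS"), ("chunk", "EOS")]) (i + j) []) "pos"])
          ((PySem.List.pyRange 0 (2 * w + 1) 1).foldl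
            (fun x j => x ++ [PySem.Str.lower (pvTokGet (PySem.List.pyGetD (List.replicate w.toNat [("form", "BOS"), ("pos", "BOS"), ("chunk", "BOS")] ++ sentence ++ List.replicate w.toNat [("form", "EOS"), ("pos", "EOS"), ("chunk", "EOS")]) (i + j) []) "form")]) [])))).items)
    (G := fun i => pvTokGet (PySem.List.pyGetD (List.replicate w.toNat [("form", "BOS"), ("pos", "BOS"), ("chunk", "BOS")] ++ sentence ++ List.replicate w.toNat [("form", "EOS"), ("pos", "EOS"), ("chunk", "EOS")]) (i + w) []) "chunk")
    ([], [])]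
  simp only [List.nil_append]
  have hmem : ∀ i ∈ PySem.List.pyRange 0 ((sentence.length : Int)) 1,
      0 ≤ i ∧ i < (sentence.length : Int) := by
    intro i hi
    rw [PySem.List.mem_pyRange_one] at hi
    exact hi
  rw [Prod.mk.injEq]
  refine ⟨?_, ?_⟩
  · apply List.map_congr_left
    intro i hi
    obtain ⟨hi0, hin⟩ := hmem i hi
    simp only [PySem.List.foldl_append_singleton_eq_map, List.nil_append]
    congr 2
    congr 1
    congr 1
    · -- forms block
      rw [PySem.List.pyRange_one 0 (2 * w + 1), PySem.List.pyRange_one (-w) (w + 1),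
        List.map_map, List.map_map]
      have hN : (w + 1 - -w).toNat = (2 * w + 1 - 0).toNat := by omega
      rw [hN]
      apply List.map_congr_left
      intro k hk
      rw [List.mem_range] at hk
      simp only [Function.comp]
      have h1 : i + ((0 : Int) + (k : Int)) = (i + (k : Int) - w) + w := by ring
      have h2 : i + (-w + (k : Int)) = i + (k : Int) - w := by ring
      rw [h1, h2, pvPadGet sentence w (i + (k : Int) - w) _ _ hw (by omega) (by omega)]
      split_ifs with hc1 hc2
      · decide
      · decide
      · rfl
    · -- pos block
      rw [PySem.List.pyRange_one 0 (2 * w + 1), PySem.List.pyRange_one (-w) (w + 1),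
        List.map_map, List.map_map]
      have hN : (w + 1 - -w).toNat = (2 * w + 1 - 0).toNat := by omega
      rw [hN]
      apply List.map_congr_left
      intro k hk
      rw [List.mem_range] at hk
      simp only [Function.comp]
      have h1 : i + ((0 : Int) + (k : Int)) = (i + (k : Int) - w) + w := by ring
      have h2 : i + (-w + (k : Int)) = i + (k : Int) - w := by ring
      rw [h1, h2, pvPadGet sentence w (i + (k : Int) - w) _ _ hw (by omega) (by omega)]
      split_ifs with hc1 hc2
      · decide
      · decide
      · rfl
  · apply List.map_congr_left
    intro i hi
    obtain ⟨hi0, hin⟩ := hmem i hi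
    rw [pvPadGet sentence w i _ _ hw (by omega) (by omega)]
    rw [if_neg (by omega), if_neg (by omega)]

-- ===== VERDICT (by name: the statement is the Claim_ definition above) =====
theorem extract_features_static_spec : Claim_equal_extract_features_static := by
  intro sentences w names _hdom hpre
  unfold Spec_extract_features_static
  obtain ⟨hw, _⟩ := hpre
  rcases hw with hw | hnil
  · show extract_features_static sentences w names = extract_features_static_alt sentences w names
    simp only [extract_features_static, extract_features_static_alt]
    congr 1
    funext XYl sentence
    show (XYl.1 ++ (extract_features_sent_static sentence w names).1,
          XYl.2 ++ (extract_features_sent_static sentence w names).2) = _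
    rw [pvSent_eq sentence w names hw]
    exact (pvFoldPair _ _ _ XYl).symm
  · subst hnil
    rfl
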